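-- pv_equiv track=rewrite | github.com/VirusFriendly/Krunstkammer | nmap-analysis/parse_fingerprint.py | find_fingerprints
-- ===== SOURCE A (Python) =====
-- def find_fingerprints(report):
--     """Scans through report text for fingerprint blocks
--
--     Args:
--         report (string): Nmap stdout output
--
--     Returns:
--         list: Each element containing fingerprint
--     """
--     fingerprints = list()  # Elements of Fingerprint Strings
--     fp_locations = list()  # Start and stop of each fingerprint
--     processing_fp = False  # Boolean: Do we have a beginning of a fingerprint with an end?
--
--     lines = report.splitlines(keepends=True)
--
--     for i in range(len(lines)):
--         line = lines[i]
--
--         if processing_fp: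
--             if line[:3] not in ["OS:", "SF:"]:
--                 processing_fp = False
--                 fp_locations[-1].append(i)
--         else:
--             if line[:3] in ["OS:", "SF-"]:
--                 processing_fp = True
--                 fp_locations.append([i])
--
--     if processing_fp:  # In case the last line was part of the fingerprint
--         processing_fp = False
--         fp_locations[-1].append(len(lines))
--
--     for fp in fp_locations:
--         fingerprints.append(''.join(lines[fp[0]:fp[1]]))
--
--     return fingerprints
-- ===== SOURCE B (Python) =====
-- def find_fingerprints(report):
--     """Scans through report text for fingerprint blocks (single-pass buffer version)."""
--     fingerprints = []
--     current = []          # lines of the fingerprint being collected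
--     processing = False
--     for line in report.splitlines(keepends=True):
--         if processing:
--             if line[:3] in ("OS:", "SF:"):
--                 current.append(line)
--             else:
--                 processing = False
--                 fingerprints.append(''.join(current))
--                 current = []
--         else:
--             if line[:3] in ("OS:", "SF-"):
--                 processing = True
--                 current = [line]
--     if processing:  # flush an open fingerprint at end of input
--         fingerprints.append(''.join(current))
--     return fingerprints
-- ===== Notes on version B (the rewrite author's own statement) =====
-- stated objective: simpler
-- what changed: Single pass that accumulates the current block in a line buffer and emits joined strings directly, instead of recording index ranges in a location table and joining slices in a second loop.
import Mathlib
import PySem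

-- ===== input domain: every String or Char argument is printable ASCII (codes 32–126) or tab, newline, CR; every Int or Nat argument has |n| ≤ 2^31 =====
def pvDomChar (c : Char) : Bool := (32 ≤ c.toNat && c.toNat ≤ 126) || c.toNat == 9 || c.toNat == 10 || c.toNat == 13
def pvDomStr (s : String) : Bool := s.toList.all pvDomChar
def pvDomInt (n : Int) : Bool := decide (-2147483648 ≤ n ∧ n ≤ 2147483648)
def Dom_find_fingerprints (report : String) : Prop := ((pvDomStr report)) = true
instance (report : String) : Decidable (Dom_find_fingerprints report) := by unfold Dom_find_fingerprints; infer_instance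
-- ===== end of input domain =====

-- B replaces A's index-range table and second join loop by a single pass with a line buffer (objective: simpler).

-- shared primitive: report.splitlines(keepends=True).
-- Exact on the stated ASCII domain: the only line boundaries there are '\n', '\r\n', '\r'
-- (tab is not a boundary; the other Python boundary chars are outside Dom).
def slk (cur : List Char) : List Char → List (List Char)
  | [] => if cur = [] then [] else [cur]
  | '\r' :: '\n' :: rest => (cur ++ ['\r', '\n']) :: slk [] rest
  | '\n' :: rest => (cur ++ ['\n']) :: slk [] rest
  | '\r' :: rest => (cur ++ ['\r']) :: slk [] rest
  | c :: rest => slk (cur ++ [c]) rest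
termination_by l => l.length

def splitlinesKeep (s : List Char) : List (List Char) := slk [] s

-- ===== PORT A =====
-- 'for i in range(len(lines)): line = lines[i]' ported as recursion over the (index, line) pairs
def enumFrom {α : Type} : Nat → List α → List (Nat × α)
  | _, [] => []
  | i, x :: xs => (i, x) :: enumFrom (i + 1) xs

-- state: (fp_locations split into closed (start,stop) pairs and, when processing_fp, the pending start), processing_fp, pending start
def aLoop : List (Nat × List Char) → Bool → Nat → List (Nat × Nat) → (List (Nat × Nat)) × Bool × Nat
  | [], proc, start, locs => (locs, proc, start)
  | (i, l) :: rest, true, start, locs =>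
      if l.take 3 = "OS:".toList ∨ l.take 3 = "SF:".toList then
        aLoop rest true start locs
      else
        aLoop rest false start (locs ++ [(start, i)])
  | (i, l) :: rest, false, start, locs =>
      if l.take 3 = "OS:".toList ∨ l.take 3 = "SF-".toList then
        aLoop rest true i locs
      else
        aLoop rest false start locs

-- ''.join(lines[fp[0]:fp[1]]) — nonnegative in-range slice = drop/take (PySem.List.slice_natCast)
def renderFp (lines : List (List Char)) (p : Nat × Nat) : String :=
  String.ofList (((lines.drop p.1).take (p.2 - p.1)).flatten)

-- the trailing 'if processing_fp: append len(lines)' plus the second join loop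
def finishA (lines : List (List Char)) (r : (List (Nat × Nat)) × Bool × Nat) : List String :=
  (if r.2.1 = true then r.1 ++ [(r.2.2, lines.length)] else r.1).map (renderFp lines)

def find_fingerprints (report : String) : List String :=
  let lines := splitlinesKeep report.toList
  finishA lines (aLoop (enumFrom 0 lines) false 0 [])

-- ===== PORT B =====
def bGo : List (List Char) → Bool → List (List Char) → List String → List String
  | [], proc, cur, acc => if proc then acc ++ [String.ofList cur.flatten] else acc
  | l :: ls, true, cur, acc =>
      if l.take 3 = "OS:".toList ∨ l.take 3 = "SF:".toList then
        bGo ls true (cur ++ [l]) acc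
      else
        bGo ls false [] (acc ++ [String.ofList cur.flatten])
  | l :: ls, false, cur, acc =>
      if l.take 3 = "OS:".toList ∨ l.take 3 = "SF-".toList then
        bGo ls true [l] acc
      else
        bGo ls false cur acc

def find_fingerprints_alt (report : String) : List String :=
  bGo (splitlinesKeep report.toList) false [] []

-- ===== PRECONDITION & SPEC =====
def Spec_find_fingerprints (report : String) (out : List String) : Prop := out = find_fingerprints_alt report
instance (report : String) (out : List String) : Decidable (Spec_find_fingerprints report out) := by unfold Spec_find_fingerprints; infer_instance

-- ===== CLAIM (what is proved, stated in full; the proofs are below) =====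
def Claim_equal_find_fingerprints : Prop := ∀ (report : String), Dom_find_fingerprints report → Spec_find_fingerprints report (find_fingerprints report)

-- ===== LEMMAS AND PROOFS =====

lemma bGo_false_cur (ls : List (List Char)) : ∀ cur cur' acc,
    bGo ls false cur acc = bGo ls false cur' acc := by
  induction ls with
  | nil => intro cur cur' acc; simp [bGo]
  | cons l ls ih =>
    intro cur cur' acc
    simp only [bGo]
    split_ifs
    · rfl
    · exact ih _ _ _

lemma bGo_acc (ls : List (List Char)) : ∀ (proc : Bool) cur acc,
    bGo ls proc cur acc = acc ++ bGo ls proc cur [] := by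
  induction ls with
  | nil => intro proc cur acc; cases proc <;> simp [bGo]
  | cons l ls ih =>
    intro proc cur acc
    cases proc with
    | true =>
      simp only [bGo]
      split_ifs
      · exact ih true _ acc
      · rw [ih false [] (acc ++ [String.ofList cur.flatten]),
            ih false [] ([] ++ [String.ofList cur.flatten])]
        simp
    | false =>
      simp only [bGo]
      split_ifs
      · exact ih true _ acc
      · exact ih false _ acc

lemma aLoop_bGo (lines : List (List Char)) :
    ∀ (rest : List (List Char)) (i s : Nat) (locs : List (Nat × Nat)) (proc : Bool),
    rest = lines.drop i → (proc = true → s ≤ i) →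
    finishA lines (aLoop (enumFrom i rest) proc s locs)
      = locs.map (renderFp lines) ++ bGo rest proc ((lines.drop s).take (i - s)) [] := by
  intro rest
  induction rest with
  | nil =>
    intro i s locs proc hdrop hs
    have hlen : lines.length ≤ i := by
      have := congrArg List.length hdrop
      simp [List.length_drop] at this
      omega
    cases proc with
    | false => simp [enumFrom, aLoop, finishA, bGo]
    | true =>
      have hs' := hs rfl
      simp only [enumFrom, aLoop, finishA, bGo]
      unfold renderFp
      have h1 : (lines.drop s).take (lines.length - s) = lines.drop s :=
        List.take_of_length_le (by simp)
      have h2 : (lines.drop s).take (i - s) = lines.drop s :=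
        List.take_of_length_le (by simp; omega)
      simp [h1, h2]
  | cons l ls ih =>
    intro i s locs proc hdrop hs
    have hget : lines[i]? = some l := by
      have h0 : (lines.drop i)[0]? = some l := by rw [← hdrop]; rfl
      simpa using h0
    have hi : i < lines.length := by
      have := List.getElem?_eq_some_iff.mp hget
      exact this.1
    have hrest : ls = lines.drop (i + 1) := by
      have := congrArg List.tail hdrop
      simpa [List.tail_drop] using this
    cases proc with
    | true =>
      have hs' := hs rfl
      simp only [enumFrom, aLoop, bGo]
      split_ifs with h
      · -- continue the block
        have hcur : (lines.drop s).take (i + 1 - s) = (lines.drop s).take (i - s) ++ [l] := by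
          have h1 : i + 1 - s = (i - s) + 1 := by omega
          have h2 : (lines.drop s)[i - s]? = some l := by
            rw [List.getElem?_drop]
            have : s + (i - s) = i := by omega
            rw [this]; exact hget
          rw [h1, List.take_add_one, h2]
          rfl
        rw [ih (i + 1) s locs true hrest (fun _ => by omega), hcur]
      · -- close the block here
        rw [ih (i + 1) s (locs ++ [(s, i)]) false hrest (by simp),
            bGo_false_cur ls ((lines.drop s).take (i + 1 - s)) [],
            bGo_acc ls false [] ([] ++ [String.ofList ((lines.drop s).take (i - s)).flatten])]
        simp [renderFp]
    | false =>
      simp only [enumFrom, aLoop, bGo]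
      split_ifs with h
      · -- open a block at line i
        have hcur : (lines.drop i).take (i + 1 - i) = [l] := by
          have : i + 1 - i = 1 := by omega
          rw [this, ← hdrop]
          rfl
        rw [ih (i + 1) i locs true hrest (fun _ => by omega), hcur]
      · rw [ih (i + 1) s locs false hrest (by simp)]
        exact congrArg _ (bGo_false_cur ls _ _ _)

-- ===== VERDICT (by name: the statement is the Claim_ definition above) =====
theorem find_fingerprints_spec : Claim_equal_find_fingerprints := by
  intro report _
  unfold Spec_find_fingerprints find_fingerprints find_fingerprints_alt
  have h := aLoop_bGo (splitlinesKeep report.toList) (splitlinesKeep report.toList) 0 0 [] false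
    (by simp) (by simp)
  simp only [List.map_nil, List.nil_append] at h
  rw [h]
  exact bGo_false_cur _ _ _ _
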